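-- pv_equiv track=rewrite | github.com/trustgraph-ai/trustgraph | trustgraph-flow/trustgraph/query/graphql/filters.py | parse_filter_key
-- ===== SOURCE A (Python) =====
-- from typing import Dict, Any, Tuple
--
-- def parse_filter_key(filter_key: str) -> Tuple[str, str]:
--     """
--     Parse GraphQL filter key into field name and operator.
--
--     Supports common GraphQL filter patterns:
--     - field_name -> (field_name, "eq")
--     - field_name_gt -> (field_name, "gt")
--     - field_name_gte -> (field_name, "gte")
--     - field_name_lt -> (field_name, "lt")
--     - field_name_lte -> (field_name, "lte")
--     - field_name_in -> (field_name, "in")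
--
--     Args:
--         filter_key: The filter key string from GraphQL
--
--     Returns:
--         Tuple of (field_name, operator)
--     """
--     if not filter_key:
--         return ("", "eq")
--
--     operators = ["_gte", "_lte", "_gt", "_lt", "_in", "_eq"]
--
--     for op_suffix in operators:
--         if filter_key.endswith(op_suffix):
--             field_name = filter_key[:-len(op_suffix)]
--             operator = op_suffix[1:]  # Remove the leading underscore
--             return (field_name, operator)
--
--     # Default to equality if no operator suffix found
--     return (filter_key, "eq")
-- ===== SOURCE B (Python) =====
-- def parse_filter_key(filter_key):
--     field, sep, op = filter_key.rpartition('_')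
--     if sep and op in {"gt", "gte", "lt", "lte", "in", "eq"}:
--         return (field, op)
--     return (filter_key, "eq")
-- ===== Notes on version B (the rewrite author's own statement) =====
-- stated objective: simpler
-- what changed: Replaces the ordered endswith-suffix scan loop with a single rpartition at the last underscore plus one set-membership test on the trailing token.
import Mathlib
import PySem

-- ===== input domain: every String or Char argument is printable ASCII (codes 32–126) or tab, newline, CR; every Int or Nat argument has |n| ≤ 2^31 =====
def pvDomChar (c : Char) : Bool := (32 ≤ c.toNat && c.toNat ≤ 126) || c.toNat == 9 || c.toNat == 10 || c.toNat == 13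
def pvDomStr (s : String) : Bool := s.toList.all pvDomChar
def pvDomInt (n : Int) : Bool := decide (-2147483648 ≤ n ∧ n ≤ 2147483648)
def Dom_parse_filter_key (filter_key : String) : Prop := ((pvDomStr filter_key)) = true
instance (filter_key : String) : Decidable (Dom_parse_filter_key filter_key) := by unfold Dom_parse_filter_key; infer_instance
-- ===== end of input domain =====

-- ===== PORT A =====
-- B replaces A's ordered endswith-suffix scan with a single rpartition at the last
-- underscore plus one membership test on the trailing token (objective: simpler).

-- A's operators list, in A's order
def pvAOps : List (List Char) := [['_','g','t','e'], ['_','l','t','e'], ['_','g','t'], ['_','l','t'], ['_','i','n'], ['_','e','q']]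

-- A's 'for op_suffix in operators' loop: first endswith match returns
def pvALoop (l : List Char) : List (List Char) → List Char × List Char
  | [] => (l, ['e','q'])
  | op :: rest =>
    if PySem.Chars.endswith l op then
      (PySem.Chars.slice l none (some (-(op.length : Int))), PySem.Chars.slice op (some 1) none)
    else pvALoop l rest

def parse_filter_key (filter_key : String) : String × String :=
  if PySem.Str.len filter_key = 0 then ("", "eq")
  else
    let p := pvALoop filter_key.toList pvAOps
    (String.ofList p.1, String.ofList p.2)

-- ===== PORT B =====
-- filter_key.rpartition('_'), ported by hand (PySem has no rpartition); exact: the part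
-- after the LAST '_' is the longest '_'-free suffix, i.e. takeWhile (· ≠ '_') of the reverse.
def pvRpartitionU (l : List Char) : List Char × Bool × List Char :=
  let r := l.reverse
  let opRev := r.takeWhile (fun c => c ≠ '_')
  if opRev.length < r.length then ((r.drop (opRev.length + 1)).reverse, true, opRev.reverse)
  else ([], false, l)

-- B's operator set {"gt","gte","lt","lte","in","eq"}
def pvBOps : List (List Char) := [['g','t'], ['g','t','e'], ['l','t'], ['l','t','e'], ['i','n'], ['e','q']]

def parse_filter_key_alt (filter_key : String) : String × String :=
  let t := pvRpartitionU filter_key.toList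
  if t.2.1 = true ∧ t.2.2 ∈ pvBOps then (String.ofList t.1, String.ofList t.2.2)
  else (filter_key, "eq")

-- ===== PRECONDITION & SPEC =====
def Spec_parse_filter_key (filter_key : String) (out : String × String) : Prop := out = parse_filter_key_alt filter_key
instance (filter_key : String) (out : String × String) : Decidable (Spec_parse_filter_key filter_key out) := by unfold Spec_parse_filter_key; infer_instance

-- ===== CLAIM (what is proved, stated in full; the proofs are below) =====
def Claim_equal_parse_filter_key : Prop := ∀ (filter_key : String), Dom_parse_filter_key filter_key → Spec_parse_filter_key filter_key (parse_filter_key filter_key)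

-- ===== LEMMAS AND PROOFS =====

-- A's endswith, read on the reversed character list
theorem pv_ends_iff (r op : List Char) : PySem.Chars.endswith r.reverse op = true ↔ op.reverse <+: r := by
  rw [PySem.Chars.endswith_iff, ← List.reverse_reverse op, List.reverse_suffix, List.reverse_reverse]

-- l[:-4] on the reverse of a 4-pattern-prefixed list
theorem pv_sliceA4 (c1 c2 c3 c4 : Char) (rest : List Char) :
    PySem.List.slice (rest.reverse ++ [c4,c3,c2,c1]) none (some (-4)) = rest.reverse := by
  rw [PySem.List.slice_to_neg_ofNat _ 4 (by omega)]
  rw [List.take_left' (by simp)]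

theorem pv_sliceA3 (c1 c2 c3 : Char) (rest : List Char) :
    PySem.List.slice (rest.reverse ++ [c3,c2,c1]) none (some (-3)) = rest.reverse := by
  rw [PySem.List.slice_to_neg_ofNat _ 3 (by omega)]
  rw [List.take_left' (by simp)]

-- when the '_'-free prefix of r is shorter than r, r splits at a '_'
theorem pv_rpart_decomp (r : List Char) (h : (r.takeWhile (fun c => c ≠ '_')).length < r.length) :
    ∃ rest, r = r.takeWhile (fun c => c ≠ '_') ++ '_' :: rest := by
  have hd : r.dropWhile (fun c => c ≠ '_') ≠ [] := by
    intro hnil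
    have hr := List.takeWhile_append_dropWhile (p := fun c => decide (c ≠ '_')) (l := r)
    rw [hnil, List.append_nil] at hr
    rw [hr] at h; omega
  obtain ⟨c, tl, hct⟩ := List.exists_cons_of_ne_nil hd
  have hc : c = '_' := by
    have h2 := List.head_dropWhile_not (fun c => decide (c ≠ '_')) hd
    simp only [hct, List.head_cons, decide_eq_false_iff_not, not_not] at h2
    exact h2
  refine ⟨tl, ?_⟩
  conv_lhs => rw [← List.takeWhile_append_dropWhile (p := fun c => decide (c ≠ '_')) (l := r)]
  rw [hct, hc]

theorem pv_main (s : String) : parse_filter_key s = parse_filter_key_alt s := by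
  obtain ⟨r, hr⟩ : ∃ r : List Char, s.toList = r.reverse := ⟨s.toList.reverse, (List.reverse_reverse _).symm⟩
  unfold parse_filter_key parse_filter_key_alt pvRpartitionU
  simp only [hr, PySem.Str.len_eq, pvALoop, pvAOps, pv_ends_iff, List.reverse_cons,
    List.reverse_nil, List.nil_append, List.cons_append, List.reverse_reverse, List.length_reverse]
  have hs : s = String.ofList r.reverse := by rw [← hr, String.ofList_toList]
  by_cases h1 : ['e','t','g','_'] <+: r
  · obtain ⟨rest, rfl⟩ := h1
    simp [pvBOps, PySem.List.slice_from_one]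
    rw [if_neg (by omega), pv_sliceA4]
  · by_cases h2 : ['e','t','l','_'] <+: r
    · obtain ⟨rest, rfl⟩ := h2
      simp [pvBOps, PySem.List.slice_from_one]
      rw [if_neg (by omega), pv_sliceA4]
    · by_cases h3 : ['t','g','_'] <+: r
      · obtain ⟨rest, rfl⟩ := h3
        simp [pvBOps, PySem.List.slice_from_one]
        rw [if_neg (by omega), pv_sliceA3]
      · by_cases h4 : ['t','l','_'] <+: r
        · obtain ⟨rest, rfl⟩ := h4
          simp [pvBOps, PySem.List.slice_from_one]
          rw [if_neg (by omega), pv_sliceA3]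
        · by_cases h5 : ['n','i','_'] <+: r
          · obtain ⟨rest, rfl⟩ := h5
            simp [pvBOps, PySem.List.slice_from_one]
            rw [if_neg (by omega), pv_sliceA3]
          · by_cases h6 : ['q','e','_'] <+: r
            · obtain ⟨rest, rfl⟩ := h6
              simp [pvBOps, PySem.List.slice_from_one]
              rw [if_neg (by omega), pv_sliceA3]
            · -- no operator suffix: both sides default to (s, "eq")
              rcases eq_or_ne r [] with hnil | hnil
              · subst hnil
                simp [hs]
              · by_cases hlen : (List.takeWhile (fun c => decide (c ≠ '_')) r).length < r.length
                · have hnot : (List.takeWhile (fun c => decide (c ≠ '_')) r).reverse ∉ pvBOps := by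
                    intro hm
                    obtain ⟨rest, hre⟩ := pv_rpart_decomp r hlen
                    simp only [pvBOps, List.mem_cons, List.not_mem_nil, or_false] at hm
                    rcases hm with h | h | h | h | h | h <;> rw [List.reverse_eq_iff] at h
                    · exact h3 ⟨rest, by rw [hre, h]; rfl⟩
                    · exact h1 ⟨rest, by rw [hre, h]; rfl⟩
                    · exact h4 ⟨rest, by rw [hre, h]; rfl⟩
                    · exact h2 ⟨rest, by rw [hre, h]; rfl⟩
                    · exact h5 ⟨rest, by rw [hre, h]; rfl⟩
                    · exact h6 ⟨rest, by rw [hre, h]; rfl⟩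
                  simp only [ne_eq, decide_not] at hlen hnot
                  simp [h1, h2, h3, h4, h5, h6, hlen, hnot, hs, hnil]
                · simp only [ne_eq, decide_not] at hlen
                  simp [h1, h2, h3, h4, h5, h6, hlen, hs, hnil]

-- ===== VERDICT (by name: the statement is the Claim_ definition above) =====
theorem parse_filter_key_spec : Claim_equal_parse_filter_key := by
  intro s _
  unfold Spec_parse_filter_key
  exact pv_main s
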